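-- pv_equiv track=rewrite | github.com/kulraghav/CodePractice | practice.py | lonely_pix
-- ===== SOURCE A (Python) =====
-- def lonely_pix(M):
--     if not M:
--         return 0
--
--     row_counts = [0]*len(M)
--     column_counts = [0]*len(M[0])
--
--     for i in range(len(M)):
--         for j in range(len(M[0])):
--             if M[i][j] == 'B':
--                 row_counts[i] = row_counts[i] + 1
--                 column_counts[j] = column_counts[j] + 1
--
--     row_candidates = [i for (i, count) in enumerate(row_counts) if count == 1]
--     column_candidates = [j for (j, count) in enumerate(column_counts) if count == 1]
--
--     lonely_bs = []
--     for i in row_candidates: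
--         for j in column_candidates:
--             if M[i][j] == 'B':
--                 lonely_bs.append((i,j))
--
--     return lonely_bs
-- ===== SOURCE B (Python) =====
-- def lonely_pix(M):
--     if not M:
--         return 0
--
--     n = len(M[0])
--     row_counts = [0] * len(M)
--     column_counts = [0] * n
--     bs = []
--
--     for i in range(len(M)):
--         for j in range(n):
--             if M[i][j] == 'B':
--                 row_counts[i] += 1
--                 column_counts[j] += 1
--                 bs.append((i, j))
--
--     return [(i, j) for (i, j) in bs if row_counts[i] == 1 and column_counts[j] == 1]
-- ===== Notes on version B (the rewrite author's own statement) =====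
-- stated objective: alternative
-- what changed: the single counting scan also records every 'B' coordinate, and the two candidate lists plus the nested candidate-by-candidate re-scan of the matrix are replaced by one filtering pass over the recorded coordinates
-- outside the precondition, e.g. on lonely_pix([]): A returns 0, B returns 0
import Mathlib
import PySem

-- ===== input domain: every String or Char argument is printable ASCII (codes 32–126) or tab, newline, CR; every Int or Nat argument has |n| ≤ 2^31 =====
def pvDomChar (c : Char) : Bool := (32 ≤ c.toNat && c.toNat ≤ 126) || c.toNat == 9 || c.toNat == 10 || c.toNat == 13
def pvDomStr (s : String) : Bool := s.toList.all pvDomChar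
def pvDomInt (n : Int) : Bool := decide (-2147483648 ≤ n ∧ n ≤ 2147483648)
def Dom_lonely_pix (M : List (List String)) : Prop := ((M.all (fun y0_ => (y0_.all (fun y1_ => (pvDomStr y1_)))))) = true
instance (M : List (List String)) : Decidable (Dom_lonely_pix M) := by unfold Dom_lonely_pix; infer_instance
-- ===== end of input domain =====

-- B fuses the work: the one counting scan also records each 'B' coordinate, and the
-- candidate-list × candidate-list re-scan of the matrix becomes a single filter over
-- those coordinates (same return value; 'alternative' decomposition, not claimed faster).

-- M[i][j] == 'B'  (shared between the two ports; total via pyGetD, exact inside Pre_)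
def pvCell (M : List (List String)) (i j : Int) : Bool :=
  PySem.List.pyGetD (PySem.List.pyGetD M i []) j "" == "B"

-- ===== PORT A =====
def lonely_pix (M : List (List String)) : List (Int × Int) :=
  if M = [] then []          -- Python returns 0 here (not a list); excluded by Pre_
  else
    let counts :=
      (PySem.List.pyRange 0 (M.length : Int) 1).foldl (fun s i =>
        (PySem.List.pyRange 0 ((PySem.List.pyGetD M 0 []).length : Int) 1).foldl (fun s j =>
          if pvCell M i j then
            (PySem.List.pySetD s.1 i (PySem.List.pyGetD s.1 i 0 + 1),
             PySem.List.pySetD s.2 j (PySem.List.pyGetD s.2 j 0 + 1))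
          else s) s)
        (PySem.List.pyRepeat ([0] : List Int) (M.length : Int),
         PySem.List.pyRepeat ([0] : List Int) ((PySem.List.pyGetD M 0 []).length : Int))
    let rowCandidates := ((PySem.List.enumerate counts.1 0).filter (fun p => p.2 == 1)).map (·.1)
    let colCandidates := ((PySem.List.enumerate counts.2 0).filter (fun p => p.2 == 1)).map (·.1)
    rowCandidates.foldl (fun acc i =>
      colCandidates.foldl (fun acc j =>
        if pvCell M i j then acc ++ [(i, j)] else acc) acc) []

-- ===== PORT B =====
def lonely_pix_alt (M : List (List String)) : List (Int × Int) :=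
  if M = [] then []          -- Python returns 0 here (not a list); excluded by Pre_
  else
    let n : Int := ((PySem.List.pyGetD M 0 []).length : Int)
    let st :=
      (PySem.List.pyRange 0 (M.length : Int) 1).foldl (fun s i =>
        (PySem.List.pyRange 0 n 1).foldl (fun s j =>
          if pvCell M i j then
            (PySem.List.pySetD s.1 i (PySem.List.pyGetD s.1 i 0 + 1),
             PySem.List.pySetD s.2.1 j (PySem.List.pyGetD s.2.1 j 0 + 1),
             s.2.2 ++ [(i, j)])
          else s) s)
        (PySem.List.pyRepeat ([0] : List Int) (M.length : Int),
         PySem.List.pyRepeat ([0] : List Int) n,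
         ([] : List (Int × Int)))
    st.2.2.filter (fun p =>
      PySem.List.pyGetD st.1 p.1 0 == 1 && PySem.List.pyGetD st.2.1 p.2 0 == 1)

-- ===== PRECONDITION & SPEC =====
-- Pre_ excludes the empty matrix, on which A returns the int 0 (not a list of pairs),
-- and ragged matrices with a row shorter than row 0, on which A raises IndexError.
def Pre_lonely_pix (M : List (List String)) : Prop :=
  M ≠ [] ∧ ∀ row ∈ M, (M.headD []).length ≤ row.length
instance (M : List (List String)) : Decidable (Pre_lonely_pix M) := by
  unfold Pre_lonely_pix; infer_instance

def pvWitness_lonely_pix : List (List String) := [["B", "W"], ["W", "B"]]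

def Spec_lonely_pix (M : List (List String)) (out : List (Int × Int)) : Prop := out = lonely_pix_alt M
instance (M : List (List String)) (out : List (Int × Int)) : Decidable (Spec_lonely_pix M out) := by unfold Spec_lonely_pix; infer_instance

-- ===== CLAIM (what is proved, stated in full; the proofs are below) =====
def Claim_equal_lonely_pix : Prop := ∀ (M : List (List String)), Dom_lonely_pix M → Pre_lonely_pix M → Spec_lonely_pix M (lonely_pix M)

-- ===== LEMMAS AND PROOFS =====

-- the three per-cell state updates of the counting scans, as functions of one grid point
def pvStepR (M : List (List String)) (rc : List Int) (p : Int × Int) : List Int :=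
  if pvCell M p.1 p.2 then PySem.List.pySetD rc p.1 (PySem.List.pyGetD rc p.1 0 + 1) else rc
def pvStepC (M : List (List String)) (cc : List Int) (p : Int × Int) : List Int :=
  if pvCell M p.1 p.2 then PySem.List.pySetD cc p.2 (PySem.List.pyGetD cc p.2 0 + 1) else cc
def pvStepB (M : List (List String)) (bs : List (Int × Int)) (p : Int × Int) : List (Int × Int) :=
  if pvCell M p.1 p.2 then bs ++ [p] else bs

lemma pv_foldl_nested {σ : Type} (rows cols : List Int) (f : σ → Int → Int → σ) (init : σ) :
    rows.foldl (fun s i => cols.foldl (fun s j => f s i j) s) init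
    = (rows.flatMap (fun i => cols.map (fun j => (i, j)))).foldl (fun s p => f s p.1 p.2) init := by
  induction rows generalizing init with
  | nil => rfl
  | cons i rs ih => simp [List.foldl_append, List.foldl_map, ih]

lemma pv_stepR_length (M : List (List String)) :
    ∀ (l : List (Int × Int)) (rc : List Int), (l.foldl (pvStepR M) rc).length = rc.length := by
  intro l
  induction l with
  | nil => intro rc; rfl
  | cons p t ih =>
    intro rc
    simp only [List.foldl_cons, ih, pvStepR]
    split <;> simp [PySem.List.length_pySetD]

lemma pv_stepC_length (M : List (List String)) :
    ∀ (l : List (Int × Int)) (cc : List Int), (l.foldl (pvStepC M) cc).length = cc.length := by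
  intro l
  induction l with
  | nil => intro cc; rfl
  | cons p t ih =>
    intro cc
    simp only [List.foldl_cons, ih, pvStepC]
    split <;> simp [PySem.List.length_pySetD]

lemma pv_filter_grid (rows cols : List Int) (qr qc : Int → Bool) (c : Int × Int → Bool) :
    ((rows.filter qr).flatMap (fun i => (cols.filter qc).map (fun j => (i, j)))).filter c
    = ((rows.flatMap (fun i => cols.map (fun j => (i, j)))).filter c).filter
        (fun p => qr p.1 && qc p.2) := by
  induction rows with
  | nil => rfl
  | cons i rs ih =>
    by_cases h : qr i = true
    · simp only [List.filter_cons, h, if_pos, List.flatMap_cons, List.filter_append, ih,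
        List.filter_map, List.filter_filter]
      congr 2
      apply List.filter_congr
      intro j _
      simp [Function.comp, h, Bool.and_comm]
    · simp only [List.filter_cons, h, Bool.false_eq_true, if_false, List.flatMap_cons,
        List.filter_append]
      have h1 : List.filter (fun p => qr p.1 && qc p.2)
          (List.filter c (List.map (fun j => (i, j)) cols)) = [] := by
        apply List.filter_eq_nil_iff.mpr
        intro p hp
        obtain ⟨j, -, rfl⟩ := List.mem_map.mp (List.mem_filter.mp hp).1
        simp [h]
      rw [h1, List.nil_append, ih]

-- ===== VERDICT (by name: the statement is the Claim_ definition above) =====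
theorem lonely_pix_spec : Claim_equal_lonely_pix := by
  intro M _ hP
  obtain ⟨hne, -⟩ := hP
  unfold Spec_lonely_pix lonely_pix lonely_pix_alt
  simp only [if_neg hne]
  rw [pv_foldl_nested, pv_foldl_nested, pv_foldl_nested]
  have eA : (fun (s : List Int × List Int) (p : Int × Int) =>
        if pvCell M p.1 p.2 = true then
          (PySem.List.pySetD s.1 p.1 (PySem.List.pyGetD s.1 p.1 0 + 1),
           PySem.List.pySetD s.2 p.2 (PySem.List.pyGetD s.2 p.2 0 + 1))
        else s)
      = (fun s p => (pvStepR M s.1 p, pvStepC M s.2 p)) := by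
    funext s p
    simp only [pvStepR, pvStepC]
    split <;> rfl
  have eB : (fun (s : List Int × List Int × List (Int × Int)) (p : Int × Int) =>
        if pvCell M p.1 p.2 = true then
          (PySem.List.pySetD s.1 p.1 (PySem.List.pyGetD s.1 p.1 0 + 1),
           PySem.List.pySetD s.2.1 p.2 (PySem.List.pyGetD s.2.1 p.2 0 + 1),
           s.2.2 ++ [(p.1, p.2)])
        else s)
      = (fun s p => (pvStepR M s.1 p, pvStepC M s.2.1 p, pvStepB M s.2.2 p)) := by
    funext s p
    simp only [pvStepR, pvStepC, pvStepB, Prod.mk.eta]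
    split <;> rfl
  simp only [eA, eB]
  rw [PySem.List.foldl_prod_mk,
      PySem.List.foldl_prod_mk (f := pvStepR M)
        (g := fun t p => (pvStepC M t.1 p, pvStepB M t.2 p)),
      PySem.List.foldl_prod_mk (f := pvStepC M) (g := pvStepB M)]
  have hbs : ∀ (l : List (Int × Int)),
      List.foldl (pvStepB M) [] l = l.filter (fun p => pvCell M p.1 p.2) := by
    intro l
    simpa [pvStepB] using
      PySem.List.foldl_append_if_eq_filter (p := fun p => pvCell M p.1 p.2)
        (l := l) (acc := [])
  simp only [Prod.mk.eta] at *
  rw [hbs]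
  rw [show (fun (s : List (Int × Int)) (p : Int × Int) =>
        if pvCell M p.1 p.2 = true then s ++ [p] else s) = pvStepB M from by
      funext s p; simp [pvStepB]]
  rw [hbs]
  have hlrc : (List.foldl (pvStepR M)
      (PySem.List.pyRepeat ([0] : List Int) (M.length : Int)) (List.flatMap
        (fun i => List.map (fun j => (i, j))
          (PySem.List.pyRange 0 ((PySem.List.pyGetD M 0 []).length : Int) 1))
        (PySem.List.pyRange 0 (M.length : Int) 1))).length = M.length := by
    rw [pv_stepR_length]
    simp [PySem.List.pyRepeat_singleton]
  have hlcc : (List.foldl (pvStepC M)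
      (PySem.List.pyRepeat ([0] : List Int) ((PySem.List.pyGetD M 0 []).length : Int))
      (List.flatMap
        (fun i => List.map (fun j => (i, j))
          (PySem.List.pyRange 0 ((PySem.List.pyGetD M 0 []).length : Int) 1))
        (PySem.List.pyRange 0 (M.length : Int) 1))).length
      = (PySem.List.pyGetD M 0 []).length := by
    rw [pv_stepC_length]
    simp [PySem.List.pyRepeat_singleton]
  rw [PySem.List.enumerate_eq_map_pyRange (d := 0), PySem.List.enumerate_eq_map_pyRange (d := 0),
      PySem.List.len_eq, PySem.List.len_eq, hlrc, hlcc]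
  simp only [List.filter_map, List.map_map, Function.comp_def, List.map_id']
  rw [pv_filter_grid]
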